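-- pv_equiv track=rewrite | github.com/FunctionalEpigeneticsLab/GiRAFR | scripts/utils.py | compare_two_sequences
-- ===== SOURCE A (Python) =====
-- def compare_two_sequences(seq1, seq2):
-- 	# only compare two sequences which have same length
-- 	# seq1= 'ATGCatcc'
-- 	# seq2= 'AAGCaTgc'
-- 	# return 1A4C
-- 	assert len(seq1) == len(seq2)
-- 	seq1 = seq1.upper()
-- 	seq2 = seq2.upper()
-- 	pos = 0
-- 	out = ''
-- 	for i in range(0,len(seq1)):
-- 		if seq1[i] ==  seq2[i]:
-- 			pos += 1
-- 		else:
-- 			#if pos == 0: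
-- 			#	out += str(seq2[i])
-- 			#else:
-- 			#	out += str(pos)+str(seq2[i])
-- 			out += str(pos) + str(seq2[i])
-- 			pos = 0 # initalise counting
-- 	out += str(pos) + 'M' # maybe should use a new symple to represent match #TODO
-- 	return out
-- ===== SOURCE B (Python) =====
-- def compare_two_sequences(seq1, seq2):
-- 	assert len(seq1) == len(seq2)
-- 	s1 = seq1.upper()
-- 	s2 = seq2.upper()
-- 	# phase 1: collect mismatch positions with the reference character
-- 	idx = [(i, c2) for i, (c1, c2) in enumerate(zip(s1, s2)) if c1 != c2]
-- 	# phase 2: walk the gaps between consecutive mismatches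
-- 	parts = []
-- 	prev = -1
-- 	for i, c in idx:
-- 		parts.append(str(i - prev - 1))
-- 		parts.append(c)
-- 		prev = i
-- 	parts.append(str(len(s1) - 1 - prev))
-- 	parts.append('M')
-- 	return ''.join(parts)
-- ===== Notes on version B (the rewrite author's own statement) =====
-- stated objective: alternative
-- what changed: Replaced the per-character accumulator loop (running match counter flushed into the string at each mismatch) by a two-phase decomposition: first collect the mismatch positions with their reference characters, then emit the output by walking the gaps between consecutive mismatch indices; Pre_ excludes unequal-length inputs, on which both raise AssertionError.
import Mathlib
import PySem

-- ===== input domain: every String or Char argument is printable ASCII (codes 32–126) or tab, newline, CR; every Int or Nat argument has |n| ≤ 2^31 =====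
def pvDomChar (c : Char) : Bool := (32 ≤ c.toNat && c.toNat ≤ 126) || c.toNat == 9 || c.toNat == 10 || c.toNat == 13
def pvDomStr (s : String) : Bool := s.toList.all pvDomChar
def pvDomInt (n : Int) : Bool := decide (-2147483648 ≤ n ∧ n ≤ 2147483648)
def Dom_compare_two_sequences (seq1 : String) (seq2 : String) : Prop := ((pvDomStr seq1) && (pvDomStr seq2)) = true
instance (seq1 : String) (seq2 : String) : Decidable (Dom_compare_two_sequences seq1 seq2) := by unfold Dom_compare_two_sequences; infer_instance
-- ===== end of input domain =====

-- B replaces A's per-character accumulator loop by a two-phase decomposition (collect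
-- mismatch positions, then walk the gaps between them); objective: alternative, same cost.

-- ===== PORT A =====
-- the Python loop 'for i in range(0, len(seq1))' reads seq1[i] and seq2[i] at the same
-- index; under Pre_ (equal lengths, as the assert demands) it is ported exactly as a
-- fold over the zipped character lists with the same (pos, out) loop state.
def compare_two_sequences (seq1 : String) (seq2 : String) : String :=
  let s1 := PySem.Chars.upper seq1.toList
  let s2 := PySem.Chars.upper seq2.toList
  let st := (s1.zip s2).foldl
    (fun (st : Int × List Char) p =>
      if p.1 == p.2 then (st.1 + 1, st.2)
      else (0, st.2 ++ PySem.Int.toChars st.1 ++ [p.2]))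
    ((0 : Int), ([] : List Char))
  String.ofList (st.2 ++ PySem.Int.toChars st.1 ++ ['M'])

-- ===== PORT B =====
def compare_two_sequences_alt (seq1 : String) (seq2 : String) : String :=
  let s1 := PySem.Chars.upper seq1.toList
  let s2 := PySem.Chars.upper seq2.toList
  -- phase 1: [(i, c2) for i, (c1, c2) in enumerate(zip(s1, s2)) if c1 != c2]
  let idx := ((PySem.List.enumerate (s1.zip s2) 0).filter
      (fun p => p.2.1 != p.2.2)).map (fun p => (p.1, p.2.2))
  -- phase 2: walk the gaps between consecutive mismatches
  let st := idx.foldl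
    (fun (st : List (List Char) × Int) p =>
      (st.1 ++ [PySem.Int.toChars (p.1 - st.2 - 1), [p.2]], p.1))
    (([] : List (List Char)), (-1 : Int))
  String.ofList ((st.1 ++ [PySem.Int.toChars ((s1.length : Int) - 1 - st.2), ['M']]).flatten)

-- ===== PRECONDITION & SPEC =====
-- Pre_ excludes exactly the unequal-length inputs, on which A's assert raises AssertionError.
def Pre_compare_two_sequences (seq1 : String) (seq2 : String) : Prop :=
  seq1.toList.length = seq2.toList.length
instance (seq1 : String) (seq2 : String) : Decidable (Pre_compare_two_sequences seq1 seq2) := by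
  unfold Pre_compare_two_sequences; infer_instance
def pvWitness_compare_two_sequences : String × String := ("ATGCatcc", "AAGCaTgc")
def Spec_compare_two_sequences (seq1 : String) (seq2 : String) (out : String) : Prop :=
  out = compare_two_sequences_alt seq1 seq2
instance (seq1 : String) (seq2 : String) (out : String) : Decidable (Spec_compare_two_sequences seq1 seq2 out) := by
  unfold Spec_compare_two_sequences; infer_instance

-- ===== CLAIM (what is proved, stated in full; the proofs are below) =====
def Claim_equal_compare_two_sequences : Prop := ∀ (seq1 : String) (seq2 : String), Dom_compare_two_sequences seq1 seq2 → Pre_compare_two_sequences seq1 seq2 → Spec_compare_two_sequences seq1 seq2 (compare_two_sequences seq1 seq2)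

-- ===== LEMMAS AND PROOFS =====

-- common recursive description of the mismatch encoding
def pvG : List (Char × Char) → Int → List Char
  | [], pos => PySem.Int.toChars pos ++ ['M']
  | p :: z, pos =>
      if p.1 == p.2 then pvG z (pos + 1)
      else PySem.Int.toChars pos ++ [p.2] ++ pvG z 0

-- recursive description of B's gap walk
def pvH : List (Int × Char) → Int → Int → List Char
  | [], prev, n => PySem.Int.toChars (n - 1 - prev) ++ ['M']
  | p :: idx, prev, n => PySem.Int.toChars (p.1 - prev - 1) ++ [p.2] ++ pvH idx p.1 n

def pvMism (z : List (Char × Char)) (s : Int) : List (Int × Char) :=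
  ((PySem.List.enumerate z s).filter (fun p => p.2.1 != p.2.2)).map (fun p => (p.1, p.2.2))

theorem pvA_fold (z : List (Char × Char)) (pos : Int) (out : List Char) :
    (z.foldl (fun (st : Int × List Char) p =>
        if p.1 == p.2 then (st.1 + 1, st.2)
        else (0, st.2 ++ PySem.Int.toChars st.1 ++ [p.2])) (pos, out)).2
      ++ PySem.Int.toChars (z.foldl (fun (st : Int × List Char) p =>
        if p.1 == p.2 then (st.1 + 1, st.2)
        else (0, st.2 ++ PySem.Int.toChars st.1 ++ [p.2])) (pos, out)).1
      ++ ['M'] = out ++ pvG z pos := by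
  induction z generalizing pos out with
  | nil => simp [pvG]
  | cons p z ih =>
      simp only [List.foldl_cons, pvG]
      by_cases h : (p.1 == p.2) = true
      · rw [if_pos h, if_pos h, ih]
      · rw [if_neg h, if_neg h, ih]
        simp

theorem pvB_fold (idx : List (Int × Char)) (parts : List (List Char)) (prev n : Int) :
    ((idx.foldl (fun (st : List (List Char) × Int) p =>
        (st.1 ++ [PySem.Int.toChars (p.1 - st.2 - 1), [p.2]], p.1)) (parts, prev)).1
      ++ [PySem.Int.toChars (n - 1 - (idx.foldl (fun (st : List (List Char) × Int) p =>
        (st.1 ++ [PySem.Int.toChars (p.1 - st.2 - 1), [p.2]], p.1)) (parts, prev)).2), ['M']]).flatten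
    = parts.flatten ++ pvH idx prev n := by
  induction idx generalizing parts prev with
  | nil => simp [pvH]
  | cons p idx ih => simp [pvH, ih]

theorem pvMain (z : List (Char × Char)) (s pos : Int) :
    pvH (pvMism z s) (s - pos - 1) (s + z.length) = pvG z pos := by
  induction z generalizing s pos with
  | nil => simp [pvMism, pvG, pvH, PySem.List.enumerate_nil]
  | cons p z ih =>
      obtain ⟨a, b⟩ := p
      by_cases h : (a == b) = true
      · have h2 := ih (s + 1) (pos + 1)
        simp only [pvMism, PySem.List.enumerate_cons, List.filter_cons] at h2 ⊢
        have e1 : s + 1 - (pos + 1) - 1 = s - pos - 1 := by ring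
        have e2 : s + 1 + (z.length : Int) = s + ((z.length : Int) + 1) := by ring
        rw [e1, e2] at h2
        have hc : (a != b) = false := by simp [bne, h]
        simpa [hc, h, pvG] using h2
      · have h2 := ih (s + 1) 0
        simp only [pvMism, PySem.List.enumerate_cons, List.filter_cons] at h2 ⊢
        have e2 : s + 1 + (z.length : Int) = s + ((z.length : Int) + 1) := by ring
        have e3 : s + 1 - 0 - 1 = s := by ring
        rw [e2, e3] at h2
        have e1 : s - (s - pos - 1) - 1 = pos := by ring
        have hc : (a != b) = true := by simp [bne, h]
        simp [hc, h, pvG, pvH, e1, h2]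

-- ===== VERDICT (by name: the statement is the Claim_ definition above) =====
theorem compare_two_sequences_spec : Claim_equal_compare_two_sequences := by
  intro seq1 seq2 _ hpre
  unfold Spec_compare_two_sequences
  have hlen : (PySem.Chars.upper seq1.toList).length = (PySem.Chars.upper seq2.toList).length := by
    simpa [PySem.Chars.upper] using hpre
  have hz : (((PySem.Chars.upper seq1.toList).zip (PySem.Chars.upper seq2.toList)).length : Int)
      = ((PySem.Chars.upper seq1.toList).length : Int) := by
    simp [List.length_zip, hlen]
  have key := pvMain ((PySem.Chars.upper seq1.toList).zip (PySem.Chars.upper seq2.toList)) 0 0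
  simp only [pvMism, zero_sub, zero_add, hz] at key
  norm_num at key
  simp only [compare_two_sequences, compare_two_sequences_alt, pvA_fold, pvB_fold]
  simp [key]
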